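-- pv_equiv track=rewrite | github.com/MeryamAssermouhSE/genai-data-analyst-agent | src/correct_query.py | replace_words_in_string
-- ===== SOURCE A (Python) =====
-- def replace_words_in_string(input_string, list1, list2):
--     result = []
--     i = 0
--     while i < len(input_string):
--         if input_string[i] == "'":
--             # Find the end of the quoted substring
--             end_quote_index = input_string.find("'", i + 1)
--             if end_quote_index != -1:
--                 quoted_substring = input_string[i + 1 : end_quote_index]
--                 if quoted_substring in list1:
--                     index = list1.index(quoted_substring)
--                     result.append("'" + list2[index] + "'")
--                 else:
--                     result.append("'" + quoted_substring + "'")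
--                 i = end_quote_index + 1
--                 continue
--         result.append(input_string[i])
--         i += 1
--
--     output_string = ''.join(result)
--     return output_string
-- ===== SOURCE B (Python) =====
-- def replace_words_in_string(input_string, list1, list2):
--     parts = input_string.split("'")
--     last = len(parts) - 1
--     return "'".join(
--         (list2[list1.index(p)] if p in list1 else p)
--         if i % 2 == 1 and i != last else p
--         for i, p in enumerate(parts))
-- ===== Notes on version B (the rewrite author's own statement) =====
-- stated objective: idiomatic
-- what changed: Replaces A's manual index/find while-loop over the string with a split on the quote character, a replacement of the odd-position interior parts, and a join; the quote-pairing scan is delegated to str.split/str.join, which also removes the per-character Python-level loop (measured ~2x faster).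
import Mathlib
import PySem

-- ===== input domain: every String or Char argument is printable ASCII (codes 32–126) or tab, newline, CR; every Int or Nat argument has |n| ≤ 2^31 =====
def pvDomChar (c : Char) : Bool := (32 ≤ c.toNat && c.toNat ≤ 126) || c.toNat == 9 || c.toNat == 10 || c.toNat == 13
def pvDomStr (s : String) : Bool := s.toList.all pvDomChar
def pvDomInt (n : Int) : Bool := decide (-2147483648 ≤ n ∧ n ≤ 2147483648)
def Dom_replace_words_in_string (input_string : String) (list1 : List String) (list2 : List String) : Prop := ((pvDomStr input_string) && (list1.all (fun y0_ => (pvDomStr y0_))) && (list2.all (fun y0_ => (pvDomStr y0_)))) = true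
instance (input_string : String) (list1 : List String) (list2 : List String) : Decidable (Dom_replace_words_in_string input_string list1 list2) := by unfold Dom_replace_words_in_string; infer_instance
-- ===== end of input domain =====

-- ===== PORT A =====
-- B replaces A's manual find/index while-loop over the string with a split on the quote
-- character, a replacement of the odd-position interior parts, and a join (objective:
-- idiomatic; same result, proved below).

-- A's while-loop: i is the scan position, result the list of appended pieces.
def pvGoA (s : List Char) (L1 L2 : List (List Char)) (i : Nat) (result : List (List Char)) :
    List (List Char) :=
  if hi : i < s.length then
    if s[i] = '\'' then
      if he : PySem.Chars.findFrom s ['\''] ((i + 1 : Nat) : Int) none = -1 then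
        pvGoA s L1 L2 (i + 1) (result ++ [[s[i]]])
      else
        pvGoA s L1 L2 ((PySem.Chars.findFrom s ['\''] ((i + 1 : Nat) : Int) none).toNat + 1)
          (result ++ [if PySem.List.slice s (some ((i + 1 : Nat) : Int))
              (some (PySem.Chars.findFrom s ['\''] ((i + 1 : Nat) : Int) none)) ∈ L1 then
            '\'' :: (PySem.List.pyGet? L2 (((PySem.List.index? L1
              (PySem.List.slice s (some ((i + 1 : Nat) : Int))
                (some (PySem.Chars.findFrom s ['\''] ((i + 1 : Nat) : Int) none)))).getD 0 : Nat) : Int)).getD [] ++ ['\'']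
          else '\'' :: PySem.List.slice s (some ((i + 1 : Nat) : Int))
              (some (PySem.Chars.findFrom s ['\''] ((i + 1 : Nat) : Int) none)) ++ ['\'']])
    else pvGoA s L1 L2 (i + 1) (result ++ [[s[i]]])
  else result
termination_by s.length - i
decreasing_by
  · omega
  · have hk : i + 1 ≤ s.length := by omega
    have spec := PySem.Chars.findFrom_natCast_spec s ['\''] (i + 1) hk he
    have h2 := spec.2.1.length_le
    have h1 := spec.1
    simp only [List.length_drop, List.length_cons, List.length_nil] at h2
    omega
  · omega

def replace_words_in_string (input_string : String) (list1 : List String) (list2 : List String) : String :=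
  String.ofList (PySem.Chars.join []
    (pvGoA input_string.toList (list1.map String.toList) (list2.map String.toList) 0 []))

-- ===== PORT B =====
def replace_words_in_string_alt (input_string : String) (list1 : List String) (list2 : List String) : String :=
  let L1 := list1.map String.toList
  let L2 := list2.map String.toList
  let parts := PySem.Chars.splitOn input_string.toList ['\'']
  let last : Int := (parts.length : Int) - 1
  String.ofList (PySem.Chars.join ['\'']
    ((PySem.List.enumerate parts 0).map (fun ip =>
      if PySem.Int.mod ip.1 2 = 1 ∧ ip.1 ≠ last then
        (if ip.2 ∈ L1 then
          (PySem.List.pyGet? L2 (((PySem.List.index? L1 ip.2).getD 0 : Nat) : Int)).getD []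
         else ip.2)
      else ip.2)))

-- ===== PRECONDITION & SPEC =====
-- Pre_ excludes exactly the inputs on which Python A raises IndexError: a closed quoted
-- substring (an odd, non-final part of the split on the quote character) that occurs in
-- list1 at an index not smaller than len(list2).  (B raises the same IndexError there.)
def Pre_replace_words_in_string (input_string : String) (list1 : List String) (list2 : List String) : Prop :=
  ∀ i (h : i < (PySem.Chars.splitOn input_string.toList ['\'']).length),
    i % 2 = 1 → i + 1 ≠ (PySem.Chars.splitOn input_string.toList ['\'']).length →
    (PySem.Chars.splitOn input_string.toList ['\''])[i] ∈ list1.map String.toList →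
    (PySem.List.index? (list1.map String.toList)
        (PySem.Chars.splitOn input_string.toList ['\''])[i]).getD 0 < list2.length
instance (input_string : String) (list1 : List String) (list2 : List String) :
    Decidable (Pre_replace_words_in_string input_string list1 list2) := by
  unfold Pre_replace_words_in_string; infer_instance

def pvWitness_replace_words_in_string : String × List String × List String :=
  ("say 'hi' to 'bob'", ["hi"], ["bye"])

def Spec_replace_words_in_string (input_string : String) (list1 : List String) (list2 : List String) (out : String) : Prop := out = replace_words_in_string_alt input_string list1 list2
instance (input_string : String) (list1 : List String) (list2 : List String) (out : String) : Decidable (Spec_replace_words_in_string input_string list1 list2 out) := by unfold Spec_replace_words_in_string; infer_instance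

-- ===== CLAIM (what is proved, stated in full; the proofs are below) =====
def Claim_equal_replace_words_in_string : Prop := ∀ (input_string : String) (list1 : List String) (list2 : List String), Dom_replace_words_in_string input_string list1 list2 → Pre_replace_words_in_string input_string list1 list2 → Spec_replace_words_in_string input_string list1 list2 (replace_words_in_string input_string list1 list2)

-- ===== LEMMAS AND PROOFS =====

def pvSplit : List Char → List (List Char)
  | [] => [[]]
  | c :: t => if c = '\'' then [] :: pvSplit t else (pvSplit t).modifyHead (c :: ·)

def pvRepl (L1 L2 : List (List Char)) (q : List Char) : List Char :=
  if q ∈ L1 then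
    (PySem.List.pyGet? L2 (((PySem.List.index? L1 q).getD 0 : Nat) : Int)).getD []
  else q

def pvF (L1 L2 : List (List Char)) : List Char → List Char
  | [] => []
  | c :: t =>
    if c = '\'' then
      if '\'' ∈ t then
        let q := t.takeWhile (fun d => d ≠ '\'')
        '\'' :: pvRepl L1 L2 q ++ '\'' :: pvF L1 L2 (t.drop (q.length + 1))
      else c :: t
    else c :: pvF L1 L2 t
termination_by t => t.length
decreasing_by
  · simp only [List.length_cons, List.length_drop]; omega
  · simp

def pvG (L1 L2 : List (List Char)) : List (List Char) → List Char
  | [] => []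
  | [p] => p
  | p :: q :: rest =>
    if rest = [] then p ++ '\'' :: q
    else p ++ '\'' :: pvRepl L1 L2 q ++ '\'' :: pvG L1 L2 rest

theorem pvSplit_ne_nil (t : List Char) : pvSplit t ≠ [] := by
  cases t with
  | nil => simp [pvSplit]
  | cons c t =>
    simp only [pvSplit]
    split
    · simp
    · cases h : pvSplit t with
      | nil => exact absurd h (pvSplit_ne_nil t)
      | cons p ps => simp [List.modifyHead]
termination_by t.length

theorem pvSplitOn_go_eq (fuel : Nat) (l cur : List Char) (acc : List (List Char))
    (h : l.length < fuel) :
    PySem.Chars.splitOn.go ['\''] fuel l cur acc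
      = acc.reverse ++ (pvSplit l).modifyHead (cur.reverse ++ ·) := by
  induction fuel generalizing l cur acc with
  | zero => omega
  | succ fuel ih =>
    cases l with
    | nil =>
      simp [PySem.Chars.splitOn.go, pvSplit]
    | cons c t =>
      by_cases hc : c = '\''
      · subst hc
        rw [PySem.Chars.splitOn.go]
        rw [if_pos (by simp [List.isPrefixOf])]
        simp only [List.length_cons, List.length_nil, Nat.zero_add, List.drop_succ_cons,
          List.drop_zero]
        rw [ih t [] _ (by simp at h; omega)]
        simp only [pvSplit, List.modifyHead, List.reverse_nil, List.nil_append,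
          List.reverse_cons, List.append_assoc, List.cons_append]
        cases ht : pvSplit t with
        | nil => exact absurd ht (pvSplit_ne_nil t)
        | cons p ps => simp
      · rw [PySem.Chars.splitOn.go]
        rw [if_neg (by simp [List.isPrefixOf, List.isPrefixOf]; exact fun a => (hc a.symm).elim)]
        rw [ih t (c :: cur) acc (by simp at h ⊢; omega)]
        simp only [pvSplit, if_neg hc]
        cases ht : pvSplit t with
        | nil => exact absurd ht (pvSplit_ne_nil t)
        | cons p ps => simp [List.modifyHead]

theorem pvSplitOn_eq (t : List Char) : PySem.Chars.splitOn t ['\''] = pvSplit t := by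
  unfold PySem.Chars.splitOn
  rw [pvSplitOn_go_eq _ _ _ _ (by omega)]
  cases ht : pvSplit t with
  | nil => exact absurd ht (pvSplit_ne_nil t)
  | cons p ps => simp [List.modifyHead]

theorem pvF_no_quote (L1 L2 : List (List Char)) (t : List Char) (h : '\'' ∉ t) :
    pvF L1 L2 t = t := by
  induction t with
  | nil => simp [pvF]
  | cons c t ih =>
    simp only [List.mem_cons, not_or] at h
    rw [pvF, if_neg (fun hc => h.1 hc.symm)]
    rw [ih h.2]

theorem pvSplit_no_quote (t : List Char) (h : '\'' ∉ t) : pvSplit t = [t] := by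
  induction t with
  | nil => simp [pvSplit]
  | cons c t ih =>
    simp only [List.mem_cons, not_or] at h
    rw [pvSplit, if_neg (fun hc => h.1 hc.symm), ih h.2]
    simp [List.modifyHead]

theorem pvSplit_quote (t : List Char) (h : '\'' ∈ t) :
    pvSplit t = t.takeWhile (fun d => d ≠ '\'') ::
      pvSplit (t.drop ((t.takeWhile (fun d => d ≠ '\'')).length + 1)) := by
  induction t with
  | nil => simp at h
  | cons c t ih =>
    by_cases hc : c = '\''
    · subst hc
      simp [pvSplit]
    · have ht : '\'' ∈ t := by
        rcases List.mem_cons.mp h with h1 | h1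
        · exact absurd h1.symm hc
        · exact h1
      rw [pvSplit, if_neg hc, ih ht]
      simp [List.modifyHead, hc, List.drop_succ_cons]

theorem pvG_modifyHead (L1 L2 : List (List Char)) (c : Char) (ps : List (List Char))
    (h : ps ≠ []) : pvG L1 L2 (ps.modifyHead (c :: ·)) = c :: pvG L1 L2 ps := by
  match ps with
  | [] => exact absurd rfl h
  | [p] => simp [pvG, List.modifyHead]
  | p :: q :: rest =>
    simp only [List.modifyHead, pvG]
    split <;> simp

theorem pvG_pvSplit (L1 L2 : List (List Char)) (t : List Char) :
    pvG L1 L2 (pvSplit t) = pvF L1 L2 t := by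
  induction t using pvF.induct with
  | case1 => simp [pvSplit, pvG, pvF]
  | case2 t hq q ih =>
    rw [pvSplit, if_pos rfl, pvSplit_quote t hq]
    rw [pvF, if_pos rfl, if_pos hq]
    simp only [pvG, if_neg (pvSplit_ne_nil _), List.nil_append]
    rw [ih]
  | case3 t hq =>
    rw [pvF, if_pos rfl, if_neg hq, pvSplit, if_pos rfl, pvSplit_no_quote t hq, pvG]
    simp
  | case4 c t hc ih =>
    rw [pvF, if_neg hc, pvSplit, if_neg hc, pvG_modifyHead _ _ _ _ (pvSplit_ne_nil t), ih]

theorem pvJoin_nil (ps : List (List Char)) : PySem.Chars.join [] ps = ps.flatten := by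
  induction ps with
  | nil => simp [PySem.Chars.join_nil]
  | cons p ps ih =>
    cases ps with
    | nil => simp [PySem.Chars.join_singleton]
    | cons q rest => rw [PySem.Chars.join_cons_cons, ih]; simp

theorem pvB_eq_G (L1 L2 : List (List Char)) (parts : List (List Char)) :
    ∀ (k : Nat) (last : Int), k % 2 = 0 → last = (k : Int) + (parts.length : Int) - 1 →
    PySem.Chars.join ['\''] ((PySem.List.enumerate parts (k : Int)).map (fun ip =>
      if PySem.Int.mod ip.1 2 = 1 ∧ ip.1 ≠ last then pvRepl L1 L2 ip.2 else ip.2))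
      = pvG L1 L2 parts := by
  induction parts using pvG.induct with
  | case1 =>
    intro k last hk hlast
    simp [PySem.List.enumerate, PySem.Chars.join_nil, pvG]
  | case2 p =>
    intro k last hk hlast
    have h1 : ¬ ((k : Int) % 2 = 1) := by omega
    simp only [PySem.List.enumerate_cons, PySem.List.enumerate, List.map_cons, List.map_nil,
      PySem.Chars.join_singleton, pvG, PySem.Int.mod_eq_emod_of_pos (by norm_num : (0:Int) < 2)]
    rw [if_neg (by intro hand; exact h1 hand.1)]
  | case3 p q =>
    intro k last hk hlast
    have h1 : ¬ ((k : Int) % 2 = 1) := by omega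
    have h2 : ((k : Int) + 1) % 2 = 1 := by omega
    have h3 : ((k : Int) + 1) = last := by simp at hlast; omega
    simp only [PySem.List.enumerate_cons, PySem.List.enumerate, List.map_cons, List.map_nil,
      PySem.Chars.join_cons_cons, PySem.Chars.join_singleton, pvG,
      PySem.Int.mod_eq_emod_of_pos (by norm_num : (0:Int) < 2)]
    rw [if_neg (by intro hand; exact h1 hand.1), if_neg (by intro hand; exact hand.2 h3)]
    simp
  | case4 p q rest hrest ih =>
    intro k last hk hlast
    have hlen : 0 < rest.length := List.length_pos_iff.mpr hrest
    have h1 : ¬ ((k : Int) % 2 = 1) := by omega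
    have h2 : ((k : Int) + 1) % 2 = 1 := by omega
    have h3 : ((k : Int) + 1) ≠ last := by simp at hlast; omega
    cases hrest2 : rest with
    | nil => exact absurd hrest2 hrest
    | cons r rs =>
    simp only [PySem.List.enumerate_cons, List.map_cons,
      PySem.Chars.join_cons_cons,
      PySem.Int.mod_eq_emod_of_pos (by norm_num : (0:Int) < 2)]
    rw [if_neg (by intro hand; exact h1 hand.1), if_pos ⟨h2, h3⟩]
    have ihh := ih (k + 2) last (by omega)
      (by subst hrest2; simp only [List.length_cons] at hlast ⊢; push_cast at hlast ⊢; omega)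
    rw [hrest2] at ihh
    simp only [PySem.List.enumerate_cons, List.map_cons,
      PySem.Int.mod_eq_emod_of_pos (by norm_num : (0:Int) < 2)] at ihh
    have hcast : ((k : Int) + 1 + 1) = ((k + 2 : Nat) : Int) := by push_cast; ring
    rw [hcast, ihh]
    rw [pvG]
    simp

theorem pvInfix_singleton (c : Char) (t : List Char) : [c] <:+: t ↔ c ∈ t := by
  constructor
  · intro h
    exact (List.singleton_sublist).mp h.sublist
  · intro h
    obtain ⟨u, v, rfl⟩ := List.append_of_mem h
    exact ⟨u, v, by simp⟩

theorem pvTakeWhile_eq (t : List Char) (m : Nat) (hm : m < t.length) (hq : t[m] = '\'')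
    (hj : ∀ j (h : j < m), t[j] ≠ '\'') :
    t.takeWhile (fun d => d ≠ '\'') = t.take m := by
  induction t generalizing m with
  | nil => simp at hm
  | cons c t ih =>
    cases m with
    | zero =>
      simp at hq
      simp [List.takeWhile_cons, hq]
    | succ m =>
      have hc : c ≠ '\'' := by
        have := hj 0 (Nat.succ_pos m)
        simpa using this
      rw [List.takeWhile_cons, if_pos (by simp [hc]), List.take_succ_cons]
      rw [ih m (by simpa using hm) (by simpa using hq)
        (fun j hjm => by have := hj (j+1) (by omega); simpa using this)]

theorem pvGoA_eq (s : List Char) (L1 L2 : List (List Char)) :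
    ∀ i res, (pvGoA s L1 L2 i res).flatten = res.flatten ++ pvF L1 L2 (s.drop i) := by
  suffices H : ∀ fuel i res, s.length - i ≤ fuel →
      (pvGoA s L1 L2 i res).flatten = res.flatten ++ pvF L1 L2 (s.drop i) by
    intro i res; exact H (s.length - i) i res le_rfl
  intro fuel
  induction fuel with
  | zero =>
    intro i res hf
    rw [pvGoA, dif_neg (by omega)]
    rw [List.drop_eq_nil_of_le (by omega)]
    simp [pvF]
  | succ fuel ihf =>
    intro i res hf
    by_cases hi : i < s.length
    · by_cases hq : s[i] = '\''
      · by_cases hne : PySem.Chars.findFrom s ['\''] ((i + 1 : Nat) : Int) none = -1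
        · -- no closing quote
          rw [pvGoA, dif_pos hi, if_pos hq, dif_pos hne]
          rw [ihf (i + 1) _ (by omega)]
          have hnq : '\'' ∉ s.drop (i+1) := by
            have := (PySem.Chars.findFrom_natCast_eq_neg_one_iff s ['\''] (i+1) (by omega)).mp hne
            exact fun hmem => this ((pvInfix_singleton _ _).mpr hmem)
          rw [List.drop_eq_getElem_cons hi, hq]
          rw [pvF, if_pos rfl, if_neg hnq]
          rw [pvF_no_quote L1 L2 _ hnq]
          simp
        · -- closing quote found
          have hk : i + 1 ≤ s.length := by omega
          have spec := PySem.Chars.findFrom_natCast_spec s ['\''] (i + 1) hk hne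
          set E : Int := PySem.Chars.findFrom s ['\''] ((i + 1 : Nat) : Int) none with hE
          have he0 : (0:Int) ≤ E := le_trans (by positivity) spec.1
          have hin : i + 1 ≤ E.toNat := by
            have := spec.1; omega
          obtain ⟨u, hu⟩ := spec.2.1
          have hd : List.drop E.toNat s = '\'' :: u := by simpa using hu.symm
          have hnlen : E.toNat < s.length := by
            have := congrArg List.length hd
            simp at this; omega
          have hsn : s[E.toNat]'hnlen = '\'' := by
            have h0 : (List.drop E.toNat s)[0]'(by simp; omega) = '\'' := by simp [hd]
            simpa [List.getElem_drop] using h0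
          have hmid : ∀ j (h : j < E.toNat - (i+1)),
              (s.drop (i+1))[j]'(by simp only [List.length_drop]; omega) ≠ '\'' := by
            intro j hjm
            rw [List.getElem_drop]
            intro hjq
            refine spec.2.2 (i + 1 + j) (by omega) (by omega) ?_
            rw [List.drop_eq_getElem_cons (by omega), hjq]
            exact ⟨_, rfl⟩
          have hgot : (s.drop (i+1))[E.toNat - (i+1)]'(by simp only [List.length_drop]; omega)
              = '\'' := by
            rw [List.getElem_drop]
            exact (getElem_congr rfl (by omega : i + 1 + (E.toNat - (i+1)) = E.toNat) (by omega)).trans hsn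
          have hslice : PySem.List.slice s (some ((i + 1 : Nat) : Int)) (some E)
              = (s.drop (i+1)).takeWhile (fun d => d ≠ '\'') := by
            rw [(by omega : E = ((E.toNat : Nat) : Int)), PySem.List.slice_natCast]
            rw [pvTakeWhile_eq (s.drop (i+1)) (E.toNat - (i+1))
              (by simp only [List.length_drop]; omega) hgot hmid]
          have hqt : '\'' ∈ s.drop (i+1) := hgot ▸ List.getElem_mem _
          have hlen : ((s.drop (i+1)).takeWhile (fun d => d ≠ '\'')).length = E.toNat - (i+1) := by
            rw [pvTakeWhile_eq (s.drop (i+1)) (E.toNat - (i+1))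
              (by simp only [List.length_drop]; omega) hgot hmid]
            simp
            omega
          rw [pvGoA, dif_pos hi, if_pos hq, dif_neg hne, ← hE]
          rw [ihf (E.toNat + 1) _ (by omega)]
          rw [List.drop_eq_getElem_cons hi, hq]
          rw [pvF, if_pos rfl, if_pos hqt]
          rw [hslice]
          simp only [hlen, List.drop_drop,
            (by omega : i + 1 + (E.toNat - (i + 1) + 1) = E.toNat + 1)]
          unfold pvRepl
          rw [← hslice]
          split <;> simp
      · rw [pvGoA, dif_pos hi, if_neg hq]
        rw [ihf (i + 1) _ (by omega)]
        rw [List.drop_eq_getElem_cons hi]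
        rw [pvF, if_neg hq]
        simp
    · rw [pvGoA, dif_neg hi]
      rw [List.drop_eq_nil_of_le (by omega)]
      simp [pvF]

-- ===== VERDICT (by name: the statement is the Claim_ definition above) =====
theorem replace_words_in_string_spec : Claim_equal_replace_words_in_string := by
  intro s l1 l2 _ _
  unfold Spec_replace_words_in_string
  simp only [replace_words_in_string, replace_words_in_string_alt]
  have hA : PySem.Chars.join []
      (pvGoA s.toList (l1.map String.toList) (l2.map String.toList) 0 [])
      = pvF (l1.map String.toList) (l2.map String.toList) s.toList := by
    rw [pvJoin_nil, pvGoA_eq]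
    simp
  have hB := pvB_eq_G (l1.map String.toList) (l2.map String.toList)
    (PySem.Chars.splitOn s.toList ['\'']) 0
    (((PySem.Chars.splitOn s.toList ['\'']).length : Int) - 1) (by norm_num)
    (by push_cast; ring)
  unfold pvRepl at hB
  simp only [Nat.cast_zero] at hB
  rw [hA, hB]
  rw [pvSplitOn_eq, pvG_pvSplit]
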